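-- pv_equiv track=rewrite | github.com/Emma926/paradnn | scripts/plotting/plotting_utils.py | remove_while_op
-- ===== SOURCE A (Python) =====
-- def remove_while_op(d):
--     new_d = {}
--     keys = d.keys()
--     for k in keys:
--         new_d[k] = []
--     for i in range(len(d['labels'])):
--         if not 'while' in d['labels'][i]:
--             for k in keys:
--                 new_d[k].append(d[k][i])
--     return new_d
-- ===== SOURCE B (Python) =====
-- def remove_while_op(d):
--     keys = list(d)
--     li = keys.index('labels')
--     kept = [row for row in zip(*(d[k] for k in keys)) if 'while' not in row[li]]
--     return {k: [row[i] for row in kept] for i, k in enumerate(keys)}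
-- ===== Notes on version B (the rewrite author's own statement) =====
-- stated objective: alternative
-- what changed: B works row-oriented: it transposes the columns into row tuples with zip(*...), filters whole rows by their 'labels' field, and rebuilds each column from the kept rows, instead of A's index loop over range(len(labels)) that appends element-wise to every key's list.
import Mathlib
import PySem

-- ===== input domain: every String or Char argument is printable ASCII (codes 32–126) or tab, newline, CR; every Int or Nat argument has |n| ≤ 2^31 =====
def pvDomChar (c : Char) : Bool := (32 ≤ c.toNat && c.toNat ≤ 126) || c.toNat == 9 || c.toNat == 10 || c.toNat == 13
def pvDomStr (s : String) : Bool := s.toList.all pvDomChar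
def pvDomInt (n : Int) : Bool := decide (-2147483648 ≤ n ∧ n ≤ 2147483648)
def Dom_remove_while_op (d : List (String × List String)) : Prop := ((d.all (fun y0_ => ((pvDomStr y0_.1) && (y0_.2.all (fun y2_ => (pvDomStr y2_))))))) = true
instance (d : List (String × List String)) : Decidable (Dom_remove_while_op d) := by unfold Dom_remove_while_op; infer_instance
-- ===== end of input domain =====

-- B transposes the table into row tuples (zip), filters whole rows by their 'labels' field, and
-- rebuilds the columns from the kept rows — instead of A's index loop appending per key
-- (objective: alternative, row-oriented instead of column/index-oriented). Equivalence is about the return value.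

-- ===== PORT A =====
def remove_while_op (d : List (String × List String)) : List (String × List String) :=
  let dd : PySem.Dict String (List String) := PySem.Dict.ofList d
  let keys : List String := dd.keys
  let new_d : PySem.Dict String (List String) :=
    keys.foldl (fun nd k => nd.insert k ([] : List String)) PySem.Dict.empty
  let labels : List String := dd.getD "labels" []
  let final : PySem.Dict String (List String) :=
    (PySem.List.pyRange 0 (labels.length : Int)).foldl (fun nd i =>
      if !(PySem.Str.isIn "while" (PySem.List.pyGetD labels i "")) then
        keys.foldl (fun nd k =>
          nd.modify k [] (fun l => l ++ [PySem.List.pyGetD (dd.getD k []) i ""])) nd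
      else nd) new_d
  final.items

-- ===== PORT B =====
-- port of Python's zip(*cols): rows of length = shortest column (zip of no iterables = no rows)
def pyZipStar (cols : List (List String)) : List (List String) :=
  match (cols.map List.length).min? with
  | none => []
  | some m => (List.range m).map (fun i => cols.map (fun c => c.getD i ""))

def remove_while_op_alt (d : List (String × List String)) : List (String × List String) :=
  let dd : PySem.Dict String (List String) := PySem.Dict.ofList d
  let keys : List String := dd.keys
  match PySem.List.index? keys "labels" with
  | none => []   -- keys.index('labels') raises ValueError in Python; Pre_ excludes this case
  | some li =>
    let kept : List (List String) :=
      (pyZipStar (keys.map (fun k => dd.getD k []))).filter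
        (fun row => !(PySem.Str.isIn "while" (row.getD li "")))
    (PySem.List.enumerate keys).map
      (fun p => (p.2, kept.map (fun row => PySem.List.pyGetD row p.1 "")))

-- ===== PRECONDITION & SPEC =====
-- Pre_ excludes exactly the inputs where the Python A raises: a missing 'labels' key (KeyError),
-- or some column shorter than a surviving (non-'while') label index (IndexError).
def Pre_remove_while_op (d : List (String × List String)) : Prop :=
  (PySem.Dict.ofList d).contains "labels" = true ∧
  ∀ p ∈ (PySem.Dict.ofList d).items,
    ∀ j ∈ List.range ((PySem.Dict.ofList d).getD "labels" []).length,
      (!(PySem.Str.isIn "while" (((PySem.Dict.ofList d).getD "labels" []).getD j ""))) = true →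
      j < p.2.length
instance (d : List (String × List String)) : Decidable (Pre_remove_while_op d) := by
  unfold Pre_remove_while_op; infer_instance

def pvWitness_remove_while_op : (List (String × List String)) :=
  [("labels", ["add", "while_op", "mul"]), ("x", ["1", "2", "3"])]

def Spec_remove_while_op (d : List (String × List String)) (out : List (String × List String)) : Prop := out = remove_while_op_alt d
instance (d : List (String × List String)) (out : List (String × List String)) : Decidable (Spec_remove_while_op d out) := by unfold Spec_remove_while_op; infer_instance

-- ===== CLAIM (what is proved, stated in full; the proofs are below) =====
def Claim_equal_remove_while_op : Prop := ∀ (d : List (String × List String)), Dom_remove_while_op d → Pre_remove_while_op d → Spec_remove_while_op d (remove_while_op d)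

-- ===== LEMMAS AND PROOFS =====

-- filtering a Nodup list for equality with k keeps at most the one occurrence of k
theorem pv_filter_beq_of_nodup : ∀ (keys : List String), keys.Nodup → ∀ (k : String),
    keys.filter (fun x => x == k) = if k ∈ keys then [k] else []
  | [], _, k => by simp
  | a :: t, h, k => by
    rw [List.nodup_cons] at h
    obtain ⟨ha, ht⟩ := h
    by_cases hak : a = k
    · subst hak
      simp [pv_filter_beq_of_nodup t ht a, ha]
    · simp [hak, pv_filter_beq_of_nodup t ht k, List.mem_cons, Ne.symm hak]

-- one inner pass of A appends exactly one value at each key of `keys` (Nodup)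
theorem pv_inner_getD (keys : List String) (h : keys.Nodup) (g : String → String)
    (nd : PySem.Dict String (List String)) (k : String) :
    (keys.foldl (fun nd k' => nd.modify k' [] (fun l => l ++ [g k'])) nd).getD k []
      = nd.getD k [] ++ (if k ∈ keys then [g k] else []) := by
  have hfold : keys.foldl (fun nd k' => nd.modify k' [] (fun l => l ++ [g k'])) nd
      = (keys.map (fun k' => (k', g k'))).foldl
          (fun d p => d.modify p.1 [] (fun l => l ++ [p.2])) nd := by
    rw [List.foldl_map]
  rw [hfold, PySem.Dict.getD_foldl_modify_append]
  congr 1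
  have hf : List.filter (fun p => p.1 == k) (keys.map (fun k' => (k', g k')))
      = (keys.filter (fun x => x == k)).map (fun k' => (k', g k')) := by
    rw [List.filter_map]
    rfl
  rw [hf, pv_filter_beq_of_nodup keys h k]
  by_cases hk : k ∈ keys <;> simp [hk]

-- the outer loop of A, at a key of `keys`: the filtered values get appended in order
theorem pv_outer_getD (keys : List String) (h : keys.Nodup)
    (c : Int → Bool) (g : Int → String → String)
    (L : List Int) (nd : PySem.Dict String (List String)) (k : String) (hk : k ∈ keys) :
    (L.foldl (fun nd i =>
        if c i then
          keys.foldl (fun nd k' => nd.modify k' [] (fun l => l ++ [g i k'])) nd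
        else nd) nd).getD k []
      = nd.getD k [] ++ (L.filter c).map (fun i => g i k) := by
  induction L generalizing nd with
  | nil => simp
  | cons i t ih =>
    by_cases hc : c i
    · simp only [List.foldl_cons, if_pos hc, List.filter_cons_of_pos hc, List.map_cons]
      rw [ih, pv_inner_getD keys h (g i) nd k, if_pos hk, List.append_assoc]
      rfl
    · simp only [List.foldl_cons, hc, if_neg, List.filter_cons_of_neg hc, Bool.false_eq_true,
        not_false_iff]
      exact ih nd

-- the init loop stores [] at every key it touches (so getD with default [] is always [])
theorem pv_init_getD (keys : List String) (nd : PySem.Dict String (List String))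
    (hnd : ∀ k', nd.getD k' [] = []) (k : String) :
    (keys.foldl (fun nd k => nd.insert k ([] : List String)) nd).getD k [] = [] := by
  induction keys generalizing nd with
  | nil => exact hnd k
  | cons a t ih =>
    simp only [List.foldl_cons]
    exact ih (nd.insert a []) (fun k' => by rw [PySem.Dict.getD_insert]; split <;> simp [hnd])

-- absorbing updates: Set.update s l = s when every element of l is already in s
theorem pv_update_self (s : PySem.Set String) (l : List String) (h : ∀ x ∈ l, x ∈ s) :
    PySem.Set.update s l = s := by
  rw [PySem.Set.update_eq_append_filter]
  have hnil : (PySem.Set.ofList l).filter (fun y => !(PySem.Set.contains s y)) = [] := by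
    rw [List.filter_eq_nil_iff]
    intro y hy
    have hm : y ∈ l := (PySem.Set.mem_ofList l y).mp hy
    simp [h y hm]
  rw [hnil]
  simp

-- the keys of A's accumulator stay exactly `keys` through the whole outer loop
theorem pv_outer_keys (keys : List String) (c : Int → Bool) (g : Int → String → String)
    (L : List Int) (nd : PySem.Dict String (List String)) (hnd : nd.keys = keys) :
    (L.foldl (fun nd i =>
        if c i then
          keys.foldl (fun nd k' => nd.modify k' [] (fun l => l ++ [g i k'])) nd
        else nd) nd).keys = keys := by
  induction L generalizing nd with
  | nil => exact hnd
  | cons i t ih =>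
    simp only [List.foldl_cons]
    by_cases hc : c i
    · simp only [hc, if_pos]
      refine ih _ ?_
      rw [PySem.Dict.keys_foldl_modify keys ([] : List String) (fun _ k' l => l ++ [g i k']) nd,
        hnd, pv_update_self keys keys (fun x hx => hx)]
    · simpa [hc] using ih nd hnd

-- getD on a mapped list at an in-range index
theorem pv_getD_map {α β : Type} (xs : List α) (f : α → β) (j : Nat) (x : α)
    (hx : xs[j]? = some x) (dflt : β) : (xs.map f).getD j dflt = f x := by
  rw [List.getD_eq_getElem?_getD, List.getElem?_map, hx]
  rfl

-- filtering range n equals filtering range m when every hit below n is below m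
theorem pv_filter_range_restrict (p : Nat → Bool) (m n : Nat) (hmn : m ≤ n)
    (h : ∀ i, i < n → p i = true → i < m) :
    (List.range n).filter p = (List.range m).filter p := by
  obtain ⟨k, rfl⟩ := Nat.exists_eq_add_of_le hmn
  rw [List.range_add, List.filter_append]
  have hnil : ((List.range k).map (m + ·)).filter p = [] := by
    rw [List.filter_eq_nil_iff]
    intro a ha hp
    obtain ⟨b, hb, rfl⟩ := List.mem_map.mp ha
    have := h (m + b) (by have := List.mem_range.mp hb; omega) hp
    omega
  rw [hnil, List.append_nil]

-- ===== VERDICT (by name: the statement is the Claim_ definition above) =====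
theorem remove_while_op_spec : Claim_equal_remove_while_op := by
  intro d _ hpre
  obtain ⟨hcont, hlen⟩ := hpre
  unfold Spec_remove_while_op remove_while_op remove_while_op_alt
  dsimp only
  set dd : PySem.Dict String (List String) := PySem.Dict.ofList d with hdd
  have hnd : dd.keys.Nodup := PySem.Dict.nodup_keys_ofList d
  set labels : List String := dd.getD "labels" [] with hlab
  set c : Int → Bool := fun i => !(PySem.Str.isIn "while" (PySem.List.pyGetD labels i "")) with hc
  set g : Int → String → String := fun i k => PySem.List.pyGetD (dd.getD k []) i "" with hg
  set L : List Int := PySem.List.pyRange 0 (labels.length : Int) with hL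
  -- ---------- A's side: final dict has keys `dd.keys` and filtered columns ----------
  set new_d : PySem.Dict String (List String) :=
    dd.keys.foldl (fun nd k => nd.insert k ([] : List String)) PySem.Dict.empty with hnew
  have hnewkeys : new_d.keys = dd.keys := by
    rw [hnew, PySem.Dict.keys_foldl_insert,
      show (PySem.Dict.empty : PySem.Dict String (List String)).keys = PySem.Set.empty from rfl,
      PySem.Set.update_empty, PySem.Set.ofList_eq_self_of_nodup dd.keys hnd]
  set final : PySem.Dict String (List String) :=
    L.foldl (fun nd i =>
      if c i then
        dd.keys.foldl (fun nd k' => nd.modify k' [] (fun l => l ++ [g i k'])) nd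
      else nd) new_d with hfin
  have hkeys : final.keys = dd.keys := pv_outer_keys dd.keys c g L new_d hnewkeys
  have hget : ∀ k ∈ dd.keys, final.getD k [] = (L.filter c).map (fun i => g i k) := by
    intro k hk
    rw [hfin, pv_outer_getD dd.keys hnd c g L new_d k hk,
      pv_init_getD dd.keys PySem.Dict.empty (fun k' => PySem.Dict.getD_empty k' []) k]
    simp
  have hfinnd : final.keys.Nodup := by rw [hkeys]; exact hnd
  have hA : final.items = dd.keys.map (fun k => (k, (L.filter c).map (fun i => g i k))) := by
    rw [PySem.Dict.items_eq_map_keys final hfinnd [], hkeys]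
    exact List.map_congr_left (fun k hk => by rw [hget k hk])
  rw [hA]
  -- ---------- B's side ----------
  have hmem : "labels" ∈ dd.keys := by
    rw [← PySem.Dict.contains_iff_mem_keys] at *
    · exact hcont
  obtain ⟨li, hli⟩ : ∃ li, PySem.List.index? dd.keys "labels" = some li := by
    have := (PySem.List.index?_isSome_iff (xs := dd.keys) (v := "labels")).mpr hmem
    exact Option.isSome_iff_exists.mp this
  rw [hli]
  dsimp only
  obtain ⟨hlilt, hkli, _⟩ := PySem.List.getElem_of_index?_eq_some hli
  set cols : List (List String) := dd.keys.map (fun k => dd.getD k []) with hcols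
  have hclen : cols.length = dd.keys.length := by simp [hcols]
  have hlilt' : li < cols.length := by omega
  have hcli : cols[li]? = some labels := by
    rw [hcols, List.getElem?_map, List.getElem?_eq_getElem hlilt, hkli]
    rfl
  -- the min row count m
  obtain ⟨m, hm⟩ : ∃ m, (cols.map List.length).min? = some m := by
    rcases h' : (cols.map List.length).min? with _ | m
    · rw [List.min?_eq_none_iff, List.map_eq_nil_iff] at h'
      exact absurd (h' ▸ hlilt') (by simp)
    · exact ⟨m, rfl⟩
  rw [List.min?_eq_some_iff] at hm
  obtain ⟨hmmem, hmle⟩ := hm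
  have hmlab : m ≤ labels.length :=
    hmle labels.length (List.mem_map.mpr ⟨labels, List.mem_of_getElem? hcli, rfl⟩)
  -- every surviving index is below every column length, hence below m
  have hhit : ∀ i, i < labels.length →
      (!(PySem.Str.isIn "while" (labels.getD i ""))) = true → i < m := by
    intro i hi hp
    obtain ⟨col, hcolmem, rfl⟩ := List.mem_map.mp hmmem
    obtain ⟨k, hk, rfl⟩ := List.mem_map.mp hcolmem
    have hitem : (k, dd.getD k []) ∈ dd.items := by
      rw [PySem.Dict.items_eq_map_keys dd hnd []]
      exact List.mem_map.mpr ⟨k, hk, rfl⟩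
    exact hlen _ hitem i (List.mem_range.mpr hi) hp
  -- the kept rows are exactly the rows at the surviving indices
  set cnd : Nat → Bool := fun i => !(PySem.Str.isIn "while" (labels.getD i "")) with hcnd
  have hkept : (pyZipStar cols).filter
        (fun row => !(PySem.Str.isIn "while" (row.getD li "")))
      = ((List.range m).filter cnd).map (fun i => cols.map (fun col => col.getD i "")) := by
    unfold pyZipStar
    rw [List.min?_eq_some_iff.mpr ⟨hmmem, hmle⟩]
    rw [List.filter_map]
    congr 1
    apply List.filter_congr
    intro i _
    simp only [Function.comp_apply]
    rw [pv_getD_map cols (fun col => col.getD i "") li labels hcli ""]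
  rw [hkept]
  -- surviving indices: A's Int filter equals B's Nat filter
  have hidx : ∀ col : List String,
      (L.filter c).map (fun i => PySem.List.pyGetD col i "")
        = ((List.range m).filter cnd).map (fun i => col.getD i "") := by
    intro col
    rw [hL, PySem.List.pyRange_zero_natCast, List.filter_map]
    have hcc : (List.range labels.length).filter (c ∘ fun (k : Nat) => (k : Int))
        = (List.range labels.length).filter cnd := by
      apply List.filter_congr
      intro i _
      simp [hc, hcnd, PySem.List.pyGetD_natCast]
    rw [hcc, pv_filter_range_restrict cnd m labels.length hmlab
      (fun i hi hp => hhit i hi hp), List.map_map]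
    apply List.map_congr_left
    intro i _
    simp [Function.comp, PySem.List.pyGetD_natCast]
  -- compare element by element over the key positions
  apply List.ext_getElem
  · simp [PySem.List.length_enumerate]
  · intro j hj1 hj2
    simp only [List.getElem_map]
    rw [PySem.List.getElem_enumerate]
    dsimp only
    have hjk : j < dd.keys.length := by
      simpa [PySem.List.length_enumerate] using hj2
    congr 1
    rw [List.map_map]
    rw [hidx (dd.getD dd.keys[j] [])]
    apply List.map_congr_left
    intro i _
    simp only [Function.comp_apply]
    have h0j : ((0 : Int) + (j : Int)) = ((j : Nat) : Int) := by omega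
    have hcolsj : cols[j]? = some (dd.getD dd.keys[j] []) := by
      rw [hcols, List.getElem?_map, List.getElem?_eq_getElem hjk]
      rfl
    rw [h0j, PySem.List.pyGetD_natCast,
      pv_getD_map cols (fun col => col.getD i "") j (dd.getD dd.keys[j] []) hcolsj ""]
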